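-- pv_equiv track=rewrite | github.com/tramanh1511/Z-River-SOS | src/zero_shot/utils/graph.py | longest_path_branching
-- ===== SOURCE A (Python) =====
-- def longest_path_branching(tree, start, dead = []):
--     visited = set()
--     branches = []
--     def dfs(node, path, visited, branches, state=True):
--         valid = False
--         if len(tree[node]) == 0:
--             if node in dead:
--                 return [], False
--             return [node], True
--         if node in visited:
--             return path, False
--         paths = []
--         visited.add(node)
--         for neighbor in tree[node]:
--             if neighbor in visited:
--                 continue
--             path, ret = dfs(neighbor, path[:], visited, branches)
--             if ret is True:
--                 valid = True
--                 paths.append(path + [node])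
--
--         if len(paths) == 0:
--             max_path = [node]
--         else:
--             paths = sorted(paths, key= lambda x: -len(x))
--             max_path = paths[0]
--             branches += paths[1:]
--         return max_path, valid
--     output, _ = dfs(start, [], visited, branches)
--     return  branches + [output]
-- ===== SOURCE B (Python) =====
-- def longest_path_branching(tree, start, dead=[]):
--     # Iterative defunctionalized DFS: explicit frame stack instead of nested recursion;
--     # the dead 'path' argument of the recursion is dropped entirely.
--     visited = set()
--     branches = []
--     stack = [('call', start)]
--     ret = None
--     while stack:
--         frame = stack.pop()
--         if frame[0] == 'call':
--             n = frame[1]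
--             if len(tree[n]) == 0:
--                 ret = ([], False) if n in dead else ([n], True)
--             elif n in visited:
--                 ret = ([], False)
--             else:
--                 visited.add(n)
--                 stack.append(('resume', n, list(tree[n]), []))
--                 ret = None
--         else:
--             _, n, rest, paths = frame
--             if ret is not None:
--                 p, ok = ret
--                 if ok:
--                     paths = paths + [p + [n]]
--             if rest:
--                 stack.append(('resume', n, rest[1:], paths))
--                 stack.append(('call', rest[0]))
--                 ret = None
--             else:
--                 if not paths:
--                     ret = ([n], False)
--                 else:
--                     paths = sorted(paths, key=lambda x: -len(x))
--                     branches += paths[1:]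
--                     ret = (paths[0], True)
--     return branches + [ret[0]]
-- ===== Notes on version B (the rewrite author's own statement) =====
-- stated objective: alternative
-- what changed: The nested recursive dfs with shared mutable visited/branches state is replaced by an iterative defunctionalized DFS: an explicit stack of call/resume frames drives a single while loop, per-node child-path lists are accumulated in resume frames, and the recursion's dead 'path' argument is dropped.
import Mathlib
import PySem

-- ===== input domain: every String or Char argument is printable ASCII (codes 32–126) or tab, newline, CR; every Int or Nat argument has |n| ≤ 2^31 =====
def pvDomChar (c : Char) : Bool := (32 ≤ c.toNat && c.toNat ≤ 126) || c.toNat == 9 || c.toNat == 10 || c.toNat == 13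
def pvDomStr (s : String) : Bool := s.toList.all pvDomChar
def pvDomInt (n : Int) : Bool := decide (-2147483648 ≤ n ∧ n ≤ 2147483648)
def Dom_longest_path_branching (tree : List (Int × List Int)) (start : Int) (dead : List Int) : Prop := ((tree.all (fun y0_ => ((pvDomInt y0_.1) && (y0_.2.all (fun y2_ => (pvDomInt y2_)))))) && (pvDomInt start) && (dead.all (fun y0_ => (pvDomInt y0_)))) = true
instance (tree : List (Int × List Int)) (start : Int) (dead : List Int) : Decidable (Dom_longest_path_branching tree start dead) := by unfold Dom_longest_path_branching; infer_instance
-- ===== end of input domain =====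

-- B replaces the nested recursive dfs by an explicit defunctionalized frame stack (iterative
-- post-order) and drops the recursion's dead `path` argument; objective: alternative (same cost).
-- A mutates nothing observable by the caller; equivalence is about the return value.

-- ===== PORT A =====
-- tree[n] on the dict; exact under Pre_ (the key is present wherever it is looked up).
def adjOf (tree : List (Int × List Int)) (n : Int) : List Int :=
  ((PySem.Dict.mk tree).get? n).getD []

-- the `for neighbor in tree[node]` loop of A's dfs, with the recursive call passed in
def dfsLoopA (tree : List (Int × List Int)) (dead : List Int)
    (dfsf : Int → List Int → PySem.Set Int → List (List Int) →
            ((List Int × Bool) × PySem.Set Int × List (List Int)))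
    (n : Int) :
    List Int → List Int → PySem.Set Int → List (List Int) → Bool → List (List Int) →
    ((List Int × Bool) × PySem.Set Int × List (List Int))
  | [], _path, vis, br, valid, paths =>
      if paths.isEmpty then (([n], valid), vis, br)
      else
        match PySem.List.sorted paths (fun x => -(x.length : Int)) false with
        | [] => (([n], valid), vis, br)   -- unreachable: sorted of a nonempty list is nonempty
        | m :: bs => ((m, valid), vis, br ++ bs)
  | c :: rest, path, vis, br, valid, paths =>
      if PySem.Set.contains vis c then dfsLoopA tree dead dfsf n rest path vis br valid paths
      else
        match dfsf c path vis br with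
        | ((p, r), vis', br') =>
          if r then dfsLoopA tree dead dfsf n rest p vis' br' true (paths ++ [p ++ [n]])
          else dfsLoopA tree dead dfsf n rest p vis' br' valid paths

-- A's dfs; the fuel only guards totality (tree.length + 1 is always enough, proved below)
def dfsA (tree : List (Int × List Int)) (dead : List Int) :
    Nat → Int → List Int → PySem.Set Int → List (List Int) →
    ((List Int × Bool) × PySem.Set Int × List (List Int))
  | 0, _, path, vis, br => ((path, false), vis, br)
  | f+1, n, path, vis, br =>
      if (adjOf tree n).isEmpty then
        if dead.contains n then (([], false), vis, br) else (([n], true), vis, br)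
      else if PySem.Set.contains vis n then ((path, false), vis, br)
      else dfsLoopA tree dead (dfsA tree dead f) n (adjOf tree n) path (PySem.Set.add vis n) br false []

def longest_path_branching (tree : List (Int × List Int)) (start : Int) (dead : List Int) : List (List Int) :=
  match dfsA tree dead (tree.length + 1) start [] PySem.Set.empty [] with
  | ((output, _), _, br) => br ++ [output]

-- ===== PORT B =====
inductive PFrame where
  | call (n : Int)
  | resume (n : Int) (rest : List Int) (paths : List (List Int))
deriving DecidableEq, Repr

-- Source B's `if ret is not None: … if ok: paths = paths + [p + [n]]`
def absorbP (n : Int) (ret : Option (List Int × Bool)) (paths : List (List Int)) : List (List Int) :=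
  match ret with
  | some (p, true) => paths ++ [p ++ [n]]
  | _ => paths

-- termination measure helpers for the while loop (not part of Source B's data)
def stackW : List PFrame → Nat
  | [] => 0
  | PFrame.call _ :: k => 1 + stackW k
  | PFrame.resume _ rest _ :: k => 2 * rest.length + 2 + stackW k

def unvis (tree : List (Int × List Int)) (vis : PySem.Set Int) : Nat :=
  ((tree.map Prod.fst).filter (fun x => !(PySem.Set.contains vis x))).length

theorem pvFilterLenMono {α : Type} (l : List α) (p q : α → Bool)
    (h : ∀ x, p x = true → q x = true) : (l.filter p).length ≤ (l.filter q).length := by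
  induction l with
  | nil => simp
  | cons b t ih =>
    rw [List.filter_cons, List.filter_cons]
    by_cases hb : p b = true
    · simp [hb, h b hb]; omega
    · have hb' : p b = false := by simpa using hb
      cases hq : q b <;> simp [hb'] <;> omega

theorem pvFilterLenLt {α : Type} (l : List α) (p q : α → Bool)
    (h : ∀ x, p x = true → q x = true) (a : α) (ha : a ∈ l)
    (hqa : q a = true) (hpa : p a = false) :
    (l.filter p).length < (l.filter q).length := by
  induction l with
  | nil => cases ha
  | cons b t ih =>
    rw [List.filter_cons, List.filter_cons]
    rcases List.mem_cons.mp ha with heq | hat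
    · subst heq
      have := pvFilterLenMono t p q h
      simp [hpa, hqa]; omega
    · have hlt := ih hat
      cases hp : p b <;> cases hq : q b
      · simp; omega
      · simp; omega
      · exact absurd (h b (by simp [hp])) (by simp [hq])
      · simp; omega

theorem pvMemKeysOfAdj (tree : List (Int × List Int)) (n : Int)
    (h : (adjOf tree n).isEmpty = false) : n ∈ tree.map Prod.fst := by
  induction tree with
  | nil => simp [adjOf, PySem.Dict.get?] at h
  | cons p t ih =>
    by_cases hk : p.1 == n
    · simp [List.map]; left; exact (eq_of_beq hk).symm ▸ rfl
    · have : adjOf (p :: t) n = adjOf t n := by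
        simp [adjOf]
        rw [show (PySem.Dict.mk (p :: t)) = (PySem.Dict.mk ((p.1, p.2) :: t)) by rfl]
        rw [PySem.Dict.get?_mk_cons]
        simp [hk]
      rw [this] at h
      simp [List.map]; right
      simpa using ih h

theorem pvUnvisAddLt (tree : List (Int × List Int)) (vis : PySem.Set Int) (n : Int)
    (hleaf : (adjOf tree n).isEmpty = false) (hvis : PySem.Set.contains vis n = false) :
    unvis tree (PySem.Set.add vis n) < unvis tree vis := by
  have himp : ∀ x, (!(PySem.Set.contains (PySem.Set.add vis n) x)) = true →
      (!(PySem.Set.contains vis x)) = true := by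
    intro x hx
    simp only [Bool.not_eq_eq_eq_not, Bool.not_true, ← Bool.not_eq_true] at hx ⊢
    intro hc
    exact hx (by
      rw [PySem.Set.contains_iff] at hc ⊢
      rw [PySem.Set.mem_add]; exact Or.inl hc)
  have hq : (!(PySem.Set.contains vis n)) = true := by
    simp only [Bool.not_eq_eq_eq_not, Bool.not_true]; exact hvis
  have hp : (!(PySem.Set.contains (PySem.Set.add vis n) n)) = false := by
    simp only [Bool.not_eq_false']
    rw [PySem.Set.contains_iff, PySem.Set.mem_add]; exact Or.inr rfl
  exact pvFilterLenLt _ _ _ himp n (pvMemKeysOfAdj tree n hleaf) hq hp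

-- Source B's while loop as one total function over the frame stack
def exec (tree : List (Int × List Int)) (dead : List Int) :
    List PFrame → PySem.Set Int → List (List Int) → Option (List Int × Bool) →
    (List (List Int) × Option (List Int × Bool))
  | [], _vis, br, ret => (br, ret)
  | PFrame.call n :: k, vis, br, _ret =>
      if (adjOf tree n).isEmpty then
        exec tree dead k vis br (some (if dead.contains n then ([], false) else ([n], true)))
      else if _h2 : PySem.Set.contains vis n then
        exec tree dead k vis br (some ([], false))
      else
        exec tree dead (PFrame.resume n (adjOf tree n) [] :: k) (PySem.Set.add vis n) br none
  | PFrame.resume n rest paths :: k, vis, br, ret =>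
      match rest with
      | c :: rest' =>
          exec tree dead (PFrame.call c :: PFrame.resume n rest' (absorbP n ret paths) :: k) vis br none
      | [] =>
          if (absorbP n ret paths).isEmpty then exec tree dead k vis br (some ([n], false))
          else
            match PySem.List.sorted (absorbP n ret paths) (fun x => -(x.length : Int)) false with
            | [] => exec tree dead k vis br (some ([n], false))  -- unreachable
            | m :: bs => exec tree dead k vis (br ++ bs) (some (m, true))
termination_by k vis _ _ => (unvis tree vis, stackW k)
decreasing_by
  all_goals first
    | (apply Prod.Lex.right; simp only [stackW, List.length_cons]; omega)
    | (apply Prod.Lex.left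
       exact pvUnvisAddLt tree vis n (by simpa using ‹¬ (adjOf tree n).isEmpty = true›)
         (by simpa using ‹¬ PySem.Set.contains vis n = true›))

def longest_path_branching_alt (tree : List (Int × List Int)) (start : Int) (dead : List Int) : List (List Int) :=
  match exec tree dead [PFrame.call start] PySem.Set.empty [] none with
  | (br, some (p, _)) => br ++ [p]
  | (br, none) => br ++ [[]]   -- unreachable: the machine always ends with a result

-- ===== PRECONDITION & SPEC =====
-- the set of nodes reachable from start through the tree's adjacency lists, by iterated expansion
-- (tree.length rounds suffice: every reachable node is at hop distance at most the number of keys)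
def reachStep (tree : List (Int × List Int)) (S : List Int) : List Int :=
  (S ++ S.flatMap (adjOf tree)).dedup

def reachIter (tree : List (Int × List Int)) : Nat → List Int → List Int
  | 0, S => S
  | f+1, S => reachIter tree f (reachStep tree S)

-- Pre_ excludes trees with duplicate keys (an association list with duplicate keys represents no
-- Python dict) and exactly the inputs on which A raises KeyError: those where some node reachable
-- from start is not a key of the tree.  Every input on which A returns is admitted.
def Pre_longest_path_branching (tree : List (Int × List Int)) (start : Int) (dead : List Int) : Prop :=
  (tree.map Prod.fst).Nodup ∧
    ∀ n ∈ reachIter tree tree.length [start], n ∈ tree.map Prod.fst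
instance (tree : List (Int × List Int)) (start : Int) (dead : List Int) : Decidable (Pre_longest_path_branching tree start dead) := by unfold Pre_longest_path_branching; infer_instance

def pvWitness_longest_path_branching : (List (Int × List Int)) × Int × List Int :=
  ([(0, [1, 2]), (1, []), (2, [])], 0, [])

def Spec_longest_path_branching (tree : List (Int × List Int)) (start : Int) (dead : List Int) (out : List (List Int)) : Prop := out = longest_path_branching_alt tree start dead
instance (tree : List (Int × List Int)) (start : Int) (dead : List Int) (out : List (List Int)) : Decidable (Spec_longest_path_branching tree start dead out) := by unfold Spec_longest_path_branching; infer_instance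

-- ===== CLAIM (what is proved, stated in full; the proofs are below) =====
def Claim_equal_longest_path_branching : Prop := ∀ (tree : List (Int × List Int)) (start : Int) (dead : List Int), Dom_longest_path_branching tree start dead → Pre_longest_path_branching tree start dead → Spec_longest_path_branching tree start dead (longest_path_branching tree start dead)

-- ===== LEMMAS AND PROOFS =====

theorem pvUnvisMono (tree : List (Int × List Int)) (vis vis' : PySem.Set Int)
    (h : ∀ x, PySem.Set.contains vis x = true → PySem.Set.contains vis' x = true) :
    unvis tree vis' ≤ unvis tree vis := by
  apply pvFilterLenMono
  intro x hx
  simp at hx ⊢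
  intro hc
  exact absurd (h x (by simpa using hc)) (by simpa using hx)

-- vis ⊆ vis' as Boolean membership
def SubV (v w : PySem.Set Int) : Prop :=
  ∀ x : Int, PySem.Set.contains v x = true → PySem.Set.contains w x = true

-- every visited node is an internal node of the tree
def GoodV (tree : List (Int × List Int)) (v : PySem.Set Int) : Prop :=
  ∀ x : Int, PySem.Set.contains v x = true → (adjOf tree x).isEmpty = false

theorem pvSubVAdd (vis : PySem.Set Int) (n : Int) : SubV vis (PySem.Set.add vis n) := by
  intro x hx
  rw [PySem.Set.contains_iff] at hx ⊢
  rw [PySem.Set.mem_add]; exact Or.inl hx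

theorem pvGoodVAdd (tree : List (Int × List Int)) (vis : PySem.Set Int) (n : Int)
    (hg : GoodV tree vis) (hn : (adjOf tree n).isEmpty = false) :
    GoodV tree (PySem.Set.add vis n) := by
  intro x hx
  rw [PySem.Set.contains_iff, PySem.Set.mem_add] at hx
  rcases hx with hx | rfl
  · exact hg x ((PySem.Set.contains_iff _ _).mpr hx)
  · exact hn

theorem pvLoopMono (tree : List (Int × List Int)) (dead : List Int)
    (dfsf : Int → List Int → PySem.Set Int → List (List Int) →
            ((List Int × Bool) × PySem.Set Int × List (List Int)))
    (hf : ∀ c p v b, SubV v (dfsf c p v b).2.1 ∧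
          (GoodV tree v → GoodV tree (dfsf c p v b).2.1))
    (n : Int) :
    ∀ (rest path : List Int) (vis : PySem.Set Int) (br : List (List Int)) (valid : Bool)
      (paths : List (List Int)),
      SubV vis (dfsLoopA tree dead dfsf n rest path vis br valid paths).2.1 ∧
      (GoodV tree vis → GoodV tree (dfsLoopA tree dead dfsf n rest path vis br valid paths).2.1) := by
  intro rest
  induction rest with
  | nil =>
    intro path vis br valid paths
    have hv : (dfsLoopA tree dead dfsf n [] path vis br valid paths).2.1 = vis := by
      simp only [dfsLoopA]
      split
      · rfl
      · split <;> rfl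
    rw [hv]
    exact ⟨fun x h => h, fun h => h⟩
  | cons c rest ih =>
    intro path vis br valid paths
    by_cases hc : PySem.Set.contains vis c = true
    · simpa only [dfsLoopA, hc, if_true] using ih path vis br valid paths
    · simp only [dfsLoopA, hc, if_false, Bool.false_eq_true]
      obtain ⟨hsub, hgood⟩ := hf c path vis br
      rcases hE : dfsf c path vis br with ⟨⟨p, r⟩, vis', br'⟩
      rw [hE] at hsub hgood
      simp only at hsub hgood
      cases r
      · simp only [Bool.false_eq_true, if_false]
        obtain ⟨ih1, ih2⟩ := ih p vis' br' valid paths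
        exact ⟨fun x h => ih1 x (hsub x h), fun h => ih2 (hgood h)⟩
      · simp only [if_true]
        obtain ⟨ih1, ih2⟩ := ih p vis' br' true (paths ++ [p ++ [n]])
        exact ⟨fun x h => ih1 x (hsub x h), fun h => ih2 (hgood h)⟩

theorem pvDfsMono (tree : List (Int × List Int)) (dead : List Int) :
    ∀ (f : Nat) (n : Int) (path : List Int) (vis : PySem.Set Int) (br : List (List Int)),
      SubV vis (dfsA tree dead f n path vis br).2.1 ∧
      (GoodV tree vis → GoodV tree (dfsA tree dead f n path vis br).2.1) := by
  intro f
  induction f with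
  | zero => intro n path vis br; exact ⟨fun x h => h, fun h => h⟩
  | succ g ih =>
    intro n path vis br
    by_cases hleaf : (adjOf tree n).isEmpty = true
    · simp only [dfsA, hleaf, if_true]
      split <;> exact ⟨fun x h => h, fun h => h⟩
    · by_cases hvn : PySem.Set.contains vis n = true
      · simp only [dfsA, hleaf, if_false, hvn, if_true]
        exact ⟨fun x h => h, fun h => h⟩
      · simp only [dfsA, hleaf, if_false, hvn]
        have hleaf' : (adjOf tree n).isEmpty = false := by simpa using hleaf
        obtain ⟨h1, h2⟩ := pvLoopMono tree dead (dfsA tree dead g)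
          (fun c p v b => ih c p v b) n (adjOf tree n) path (PySem.Set.add vis n) br false []
        refine ⟨fun x h => h1 x (pvSubVAdd vis n x h), fun h => h2 (pvGoodVAdd tree vis n h hleaf')⟩

theorem pvIsEmptyApp (xs : List (List Int)) (y : List Int) : (xs ++ [y]).isEmpty = false := by
  cases xs <;> rfl

theorem pvSim (tree : List (Int × List Int)) (dead : List Int) :
    ∀ f : Nat,
      (∀ (n : Int) (path : List Int) (vis : PySem.Set Int) (br : List (List Int))
         (k : List PFrame) (ret : Option (List Int × Bool)),
         GoodV tree vis → unvis tree vis < f →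
         ∃ q, exec tree dead (PFrame.call n :: k) vis br ret
               = exec tree dead k (dfsA tree dead f n path vis br).2.1
                   (dfsA tree dead f n path vis br).2.2
                   (some (q, (dfsA tree dead f n path vis br).1.2))
             ∧ ((dfsA tree dead f n path vis br).1.2 = true →
                 q = (dfsA tree dead f n path vis br).1.1))
      ∧
      (∀ (n : Int) (rest path : List Int) (vis : PySem.Set Int) (br : List (List Int))
         (paths : List (List Int)) (k : List PFrame) (ret : Option (List Int × Bool)),
         GoodV tree vis → unvis tree vis < f →
         exec tree dead (PFrame.resume n rest paths :: k) vis br ret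
           = exec tree dead k
               (dfsLoopA tree dead (dfsA tree dead f) n rest path vis br
                 (!(absorbP n ret paths).isEmpty) (absorbP n ret paths)).2.1
               (dfsLoopA tree dead (dfsA tree dead f) n rest path vis br
                 (!(absorbP n ret paths).isEmpty) (absorbP n ret paths)).2.2
               (some ((dfsLoopA tree dead (dfsA tree dead f) n rest path vis br
                 (!(absorbP n ret paths).isEmpty) (absorbP n ret paths)).1.1,
                 (dfsLoopA tree dead (dfsA tree dead f) n rest path vis br
                 (!(absorbP n ret paths).isEmpty) (absorbP n ret paths)).1.2))) := by
  intro f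
  induction f with
  | zero =>
    exact ⟨fun n path vis br k ret hg hf => absurd hf (by omega),
           fun n rest path vis br paths k ret hg hf => absurd hf (by omega)⟩
  | succ g ih =>
    obtain ⟨ih3, ih4⟩ := ih
    have s3 : ∀ (n : Int) (path : List Int) (vis : PySem.Set Int) (br : List (List Int))
         (k : List PFrame) (ret : Option (List Int × Bool)),
         GoodV tree vis → unvis tree vis < g + 1 →
         ∃ q, exec tree dead (PFrame.call n :: k) vis br ret
               = exec tree dead k (dfsA tree dead (g+1) n path vis br).2.1
                   (dfsA tree dead (g+1) n path vis br).2.2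
                   (some (q, (dfsA tree dead (g+1) n path vis br).1.2))
             ∧ ((dfsA tree dead (g+1) n path vis br).1.2 = true →
                 q = (dfsA tree dead (g+1) n path vis br).1.1) := by
      intro n path vis br k ret hg hf
      by_cases hleaf : (adjOf tree n).isEmpty = true
      · simp only [dfsA, hleaf, if_true]
        rw [exec]
        rw [if_pos hleaf]
        by_cases hd : n ∈ dead
        · exact ⟨[], by simp [hd], by simp [hd]⟩
        · exact ⟨[n], by simp [hd], by simp [hd]⟩
      · by_cases hvn : PySem.Set.contains vis n = true
        · simp only [dfsA, hleaf, if_false, hvn, if_true]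
          rw [exec]
          rw [if_neg hleaf, dif_pos hvn]
          exact ⟨[], by simp, by simp⟩
        · have hleaf' : (adjOf tree n).isEmpty = false := by simpa using hleaf
          simp only [dfsA, hleaf, hvn, if_false]
          rw [exec]
          rw [if_neg hleaf, dif_neg hvn]
          have hg' : GoodV tree (PySem.Set.add vis n) := pvGoodVAdd tree vis n hg hleaf'
          have hf' : unvis tree (PySem.Set.add vis n) < g := by
            have := pvUnvisAddLt tree vis n hleaf' (by simpa using hvn)
            omega
          have h4 := ih4 n (adjOf tree n) path (PySem.Set.add vis n) br [] k none hg' hf'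
          have habs : absorbP n none ([] : List (List Int)) = [] := rfl
          rw [habs] at h4
          simp only [List.isEmpty_nil, Bool.not_true] at h4
          refine ⟨_, h4, fun _ => rfl⟩
    refine ⟨s3, ?_⟩
    intro n rest
    induction rest with
    | nil =>
      intro path vis br paths k ret hg hf
      rw [exec]
      by_cases hpe : (absorbP n ret paths).isEmpty = true
      · simp only [dfsLoopA, hpe, if_true, Bool.not_true]
      · have hpe' : (absorbP n ret paths).isEmpty = false := by simpa using hpe
        simp only [dfsLoopA, hpe', if_false, Bool.not_false, Bool.false_eq_true]
        cases hs : PySem.List.sorted (absorbP n ret paths) (fun x => -(x.length : Int)) false with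
        | nil =>
          exact absurd ((PySem.List.sorted_eq_nil_iff _ _ _).mp hs)
            (by simpa [List.isEmpty_iff] using hpe)
        | cons m bs => rfl
    | cons c rest' ihr =>
      intro path vis br paths k ret hg hf
      rw [exec]
      by_cases hc : PySem.Set.contains vis c = true
      · -- A skips c; B's call on c hits the visited branch
        have hcleaf : (adjOf tree c).isEmpty = false := hg c hc
        rw [exec]
        rw [if_neg (by simp [hcleaf]), dif_pos hc]
        have hr := ihr path vis br (absorbP n ret paths) k (some ([], false)) hg hf
        have habs : absorbP n (some ([], false)) (absorbP n ret paths) = absorbP n ret paths := rfl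
        rw [habs] at hr
        rw [hr]
        simp only [dfsLoopA, hc, if_true]
      · -- B runs the call on c; A recurses into c
        obtain ⟨q, hB, hq⟩ := s3 c path vis br (PFrame.resume n rest' (absorbP n ret paths) :: k) none hg hf
        rcases hE : dfsA tree dead (g+1) c path vis br with ⟨⟨p, r⟩, vis1, br1⟩
        rw [hE] at hB hq
        simp only at hB hq
        rw [hB]
        have hg1 : GoodV tree vis1 := by
          have := (pvDfsMono tree dead (g+1) c path vis br).2 hg
          rwa [hE] at this
        have hf1 : unvis tree vis1 < g + 1 := by
          have hsub := (pvDfsMono tree dead (g+1) c path vis br).1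
          rw [hE] at hsub
          have := pvUnvisMono tree vis vis1 hsub
          omega
        simp only [dfsLoopA, hc, Bool.false_eq_true, if_false, hE]
        cases r with
        | true =>
          have hqp : q = p := hq rfl
          subst hqp
          have hr := ihr q vis1 br1 (absorbP n ret paths) k (some (q, true)) hg1 hf1
          have habs : absorbP n (some (q, true)) (absorbP n ret paths)
              = absorbP n ret paths ++ [q ++ [n]] := rfl
          rw [habs] at hr
          rw [hr]
          rw [pvIsEmptyApp]
          simp only [if_true, Bool.not_false]
        | false =>
          have hr := ihr p vis1 br1 (absorbP n ret paths) k (some (q, false)) hg1 hf1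
          have habs : absorbP n (some (q, false)) (absorbP n ret paths)
              = absorbP n ret paths := rfl
          rw [habs] at hr
          rw [hr]
          simp only [Bool.false_eq_true, if_false]

theorem longest_path_branching_spec : Claim_equal_longest_path_branching := by
  intro tree start dead _hdom _hpre
  unfold Spec_longest_path_branching
  unfold longest_path_branching longest_path_branching_alt
  by_cases hleaf : (adjOf tree start).isEmpty = true
  · simp only [dfsA, hleaf, if_true]
    rw [exec, if_pos hleaf, exec]
    by_cases hd : start ∈ dead <;> simp [hd]
  · have hleaf' : (adjOf tree start).isEmpty = false := by simpa using hleaf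
    have hvn : ¬ PySem.Set.contains PySem.Set.empty start = true := by simp [PySem.Set.empty]
    simp only [dfsA, hleaf, hvn, if_false, Bool.false_eq_true]
    rw [exec, if_neg hleaf, dif_neg hvn]
    have hg : GoodV tree (PySem.Set.add PySem.Set.empty start) := by
      intro x hx
      rw [PySem.Set.contains_iff, PySem.Set.mem_add] at hx
      rcases hx with hx | rfl
      · cases hx
      · exact hleaf'
    have hemp : unvis tree PySem.Set.empty = tree.length := by
      simp [unvis, PySem.Set.empty]
    have hfu : unvis tree (PySem.Set.add PySem.Set.empty start) < tree.length := by
      have := pvUnvisAddLt tree PySem.Set.empty start hleaf' (by simpa using hvn)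
      omega
    have h4 := (pvSim tree dead tree.length).2 start (adjOf tree start) []
      (PySem.Set.add PySem.Set.empty start) [] [] [] none hg hfu
    have habs : absorbP start none ([] : List (List Int)) = [] := rfl
    rw [habs] at h4
    simp only [List.isEmpty_nil, Bool.not_true] at h4
    rw [h4, exec]
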